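-- pv_equiv track=rewrite | github.com/professor-1101/nemesis | Nemesis/src/nemesis/infrastructure/collectors/network/metrics_calculator.py | get_status_code_summary
-- ===== SOURCE A (Python) =====
-- def get_status_code_summary(status_codes: dict[int, int]) -> dict[str, int]:
--     """
--     Categorize status codes into groups.
--
--     Args:
--         status_codes: Dict mapping status code to count
--
--     Returns:
--         Dictionary with success/client_error/server_error counts
--     """
--     summary = {
--         "success": 0,       # 2xx
--         "redirect": 0,      # 3xx
--         "client_error": 0,  # 4xx
--         "server_error": 0,  # 5xx
--     }
--
--     for code, count in status_codes.items():
--         if 200 <= code < 300: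
--             summary["success"] += count
--         elif 300 <= code < 400:
--             summary["redirect"] += count
--         elif 400 <= code < 500:
--             summary["client_error"] += count
--         elif 500 <= code < 600:
--             summary["server_error"] += count
--
--     return summary
-- ===== SOURCE B (Python) =====
-- def get_status_code_summary(status_codes: dict[int, int]) -> dict[str, int]:
--     def total(lo: int) -> int:
--         return sum(count for code, count in status_codes.items() if lo <= code < lo + 100)
--     return {
--         "success": total(200),
--         "redirect": total(300),
--         "client_error": total(400),
--         "server_error": total(500),
--     }
-- ===== Notes on version B (the rewrite author's own statement) =====
-- stated objective: simpler
-- what changed: Instead of a single pass mutating a four-key accumulator dict through an if/elif chain, B builds the result literal directly from four independent sum() passes, one filtered sum per category.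
import Mathlib
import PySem

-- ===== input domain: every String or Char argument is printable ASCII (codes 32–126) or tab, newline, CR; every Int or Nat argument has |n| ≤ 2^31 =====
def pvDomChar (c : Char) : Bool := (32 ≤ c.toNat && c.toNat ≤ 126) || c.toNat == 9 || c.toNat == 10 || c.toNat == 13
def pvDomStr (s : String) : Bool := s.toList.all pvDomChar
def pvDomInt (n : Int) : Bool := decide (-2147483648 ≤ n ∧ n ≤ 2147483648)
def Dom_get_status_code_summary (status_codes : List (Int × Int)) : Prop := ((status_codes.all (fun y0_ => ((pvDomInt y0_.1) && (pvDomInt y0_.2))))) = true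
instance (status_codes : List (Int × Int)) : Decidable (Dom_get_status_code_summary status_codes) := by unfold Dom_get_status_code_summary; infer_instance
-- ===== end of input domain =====

-- B replaces A's single mutating pass with an if/elif chain by a result literal built from four independent filtered sums (simpler; same cost).
-- ===== PORT A =====
-- step of A's loop: four explicit range tests, mutating the accumulator dict
def pvStepA (d : PySem.Dict String Int) (p : Int × Int) : PySem.Dict String Int :=
  if 200 ≤ p.1 ∧ p.1 < 300 then d.modify "success" 0 (· + p.2)
  else if 300 ≤ p.1 ∧ p.1 < 400 then d.modify "redirect" 0 (· + p.2)
  else if 400 ≤ p.1 ∧ p.1 < 500 then d.modify "client_error" 0 (· + p.2)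
  else if 500 ≤ p.1 ∧ p.1 < 600 then d.modify "server_error" 0 (· + p.2)
  else d

def pvInitSummary : PySem.Dict String Int :=
  PySem.Dict.ofList [("success", 0), ("redirect", 0), ("client_error", 0), ("server_error", 0)]

def get_status_code_summary (status_codes : List (Int × Int)) : List (String × Int) :=
  (status_codes.foldl pvStepA pvInitSummary).items

-- ===== PORT B =====
-- B's helper total(lo): sum(count for code, count in status_codes.items() if lo <= code < lo + 100)
def pvTotal (status_codes : List (Int × Int)) (lo : Int) : Int :=
  ((status_codes.filter (fun p => decide (lo ≤ p.1) && decide (p.1 < lo + 100))).map (fun p => p.2)).sum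

def get_status_code_summary_alt (status_codes : List (Int × Int)) : List (String × Int) :=
  [("success", pvTotal status_codes 200),
   ("redirect", pvTotal status_codes 300),
   ("client_error", pvTotal status_codes 400),
   ("server_error", pvTotal status_codes 500)]

-- ===== PRECONDITION & SPEC =====
def Spec_get_status_code_summary (status_codes : List (Int × Int)) (out : List (String × Int)) : Prop := out = get_status_code_summary_alt status_codes
instance (status_codes : List (Int × Int)) (out : List (String × Int)) : Decidable (Spec_get_status_code_summary status_codes out) := by unfold Spec_get_status_code_summary; infer_instance

-- ===== CLAIM (what is proved, stated in full; the proofs are below) =====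
def Claim_equal_get_status_code_summary : Prop := ∀ (status_codes : List (Int × Int)), Dom_get_status_code_summary status_codes → Spec_get_status_code_summary status_codes (get_status_code_summary status_codes)

-- ===== LEMMAS AND PROOFS =====
-- loop invariant: folding A's step over a four-key summary dict adds each bucket's filtered sum
lemma pvTotal_cons (code count : Int) (xs : List (Int × Int)) (lo : Int) :
    pvTotal ((code, count) :: xs) lo
    = (if lo ≤ code ∧ code < lo + 100 then count else 0) + pvTotal xs lo := by
  simp only [pvTotal, List.filter_cons]
  split_ifs with h h' <;> simp_all

lemma pvFoldA_inv (xs : List (Int × Int)) : ∀ s r c e : Int,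
    xs.foldl pvStepA (PySem.Dict.mk [("success", s), ("redirect", r), ("client_error", c), ("server_error", e)])
    = PySem.Dict.mk [("success", s + pvTotal xs 200), ("redirect", r + pvTotal xs 300),
                     ("client_error", c + pvTotal xs 400), ("server_error", e + pvTotal xs 500)] := by
  induction xs with
  | nil => intro s r c e; simp [pvTotal]
  | cons p xs ih =>
    intro s r c e
    obtain ⟨code, count⟩ := p
    rw [List.foldl_cons]
    by_cases h1 : 200 ≤ code ∧ code < 300
    · have hs : pvStepA (PySem.Dict.mk [("success", s), ("redirect", r), ("client_error", c), ("server_error", e)]) (code, count)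
          = PySem.Dict.mk [("success", s + count), ("redirect", r), ("client_error", c), ("server_error", e)] := by
        simp only [pvStepA]; rw [if_pos h1]; rfl
      rw [hs, ih]
      simp only [pvTotal_cons]
      split_ifs <;> first | (exfalso; omega) | (congr 1 <;> simp [add_assoc])
    · by_cases h2 : 300 ≤ code ∧ code < 400
      · have hs : pvStepA (PySem.Dict.mk [("success", s), ("redirect", r), ("client_error", c), ("server_error", e)]) (code, count)
            = PySem.Dict.mk [("success", s), ("redirect", r + count), ("client_error", c), ("server_error", e)] := by
          simp only [pvStepA]; rw [if_neg h1, if_pos h2]; rfl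
        rw [hs, ih]
        simp only [pvTotal_cons]
        split_ifs <;> first | (exfalso; omega) | (congr 1 <;> simp [add_assoc])
      · by_cases h3 : 400 ≤ code ∧ code < 500
        · have hs : pvStepA (PySem.Dict.mk [("success", s), ("redirect", r), ("client_error", c), ("server_error", e)]) (code, count)
              = PySem.Dict.mk [("success", s), ("redirect", r), ("client_error", c + count), ("server_error", e)] := by
            simp only [pvStepA]; rw [if_neg h1, if_neg h2, if_pos h3]; rfl
          rw [hs, ih]
          simp only [pvTotal_cons]
          split_ifs <;> first | (exfalso; omega) | (congr 1 <;> simp [add_assoc])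
        · by_cases h4 : 500 ≤ code ∧ code < 600
          · have hs : pvStepA (PySem.Dict.mk [("success", s), ("redirect", r), ("client_error", c), ("server_error", e)]) (code, count)
                = PySem.Dict.mk [("success", s), ("redirect", r), ("client_error", c), ("server_error", e + count)] := by
              simp only [pvStepA]; rw [if_neg h1, if_neg h2, if_neg h3, if_pos h4]; rfl
            rw [hs, ih]
            simp only [pvTotal_cons]
            split_ifs <;> first | (exfalso; omega) | (congr 1 <;> simp [add_assoc])
          · have hs : pvStepA (PySem.Dict.mk [("success", s), ("redirect", r), ("client_error", c), ("server_error", e)]) (code, count)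
                = PySem.Dict.mk [("success", s), ("redirect", r), ("client_error", c), ("server_error", e)] := by
              simp only [pvStepA]; rw [if_neg h1, if_neg h2, if_neg h3, if_neg h4]
            rw [hs, ih]
            simp only [pvTotal_cons]
            split_ifs <;> first | (exfalso; omega) | simp

-- ===== VERDICT (by name: the statement is the Claim_ definition above) =====
theorem get_status_code_summary_spec : Claim_equal_get_status_code_summary := by
  intro status_codes _
  unfold Spec_get_status_code_summary get_status_code_summary get_status_code_summary_alt
  have h : pvInitSummary = PySem.Dict.mk [("success", 0), ("redirect", 0), ("client_error", 0), ("server_error", 0)] := rfl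
  rw [h, pvFoldA_inv]
  simp
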